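-- pv_equiv track=rewrite | github.com/xode114kr1/algorithm-study | 프로그래머스/1/17681. ［1차］ 비밀지도/［1차］ 비밀지도.py | numtomap
-- ===== SOURCE A (Python) =====
-- def numtomap(n, size):
--     ans = ""
--     for i in range(size):
--         if n % 2 == 1:
--             ans += "#"
--         else:
--             ans += " "
--         n = n // 2
--     return ans[::-1]
-- ===== SOURCE B (Python) =====
-- def numtomap(n, size):
--     if size <= 0:
--         return ""
--     m = n % (1 << size)
--     s = format(m, '0{}b'.format(size))
--     return s.translate(str.maketrans('10', '# '))
-- ===== Notes on version B (the rewrite author's own statement) =====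
-- stated objective: faster
-- what changed: Replaced the per-bit loop with repeated string concatenation and a final reversal by masking the low bits with n % (1 << size), formatting them once as a zero-padded binary string, and translating '1'/'0' to '#'/' '.
import Mathlib
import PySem

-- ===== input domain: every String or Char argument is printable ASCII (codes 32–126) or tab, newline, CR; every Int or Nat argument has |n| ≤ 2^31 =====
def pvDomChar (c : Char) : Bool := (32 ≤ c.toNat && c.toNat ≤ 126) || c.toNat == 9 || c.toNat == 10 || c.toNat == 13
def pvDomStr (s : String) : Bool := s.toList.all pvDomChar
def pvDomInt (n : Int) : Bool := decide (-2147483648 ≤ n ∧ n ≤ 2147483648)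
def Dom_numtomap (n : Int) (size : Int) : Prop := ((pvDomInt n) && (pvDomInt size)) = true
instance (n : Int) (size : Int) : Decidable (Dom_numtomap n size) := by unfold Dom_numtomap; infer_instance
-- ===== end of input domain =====

-- B replaces A's per-bit loop (build lsb-first, reverse at the end) by one mask + fixed-width
-- binary formatting + character translation; objective: faster (a timing run measured B faster).

-- ===== PORT A =====
-- ans is kept as a List Char (Python string concatenation); ans[::-1] is the final reverse.
def numtomap (n : Int) (size : Int) : String :=
  let st := (PySem.List.pyRange 0 size 1).foldl
    (fun (st : List Char × Int) _ =>
      ((if PySem.Int.mod st.2 2 = 1 then st.1 ++ ['#'] else st.1 ++ [' ']),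
       PySem.Int.floordiv st.2 2))
    ([], n)
  String.mk st.1.reverse

-- ===== PORT B =====
-- binFmt m w = format(m, '0{w}b') for 0 ≤ m < 2^w: the w low binary digits of m, msb first.
def binFmt (m : Int) : Nat → List Char
  | 0 => []
  | w + 1 => binFmt (m / 2) w ++ [if m % 2 = 1 then '1' else '0']

def numtomap_alt (n : Int) (size : Int) : String :=
  if size ≤ 0 then "" else
    let m := PySem.Int.mod n (2 ^ size.toNat)
    let s := binFmt m size.toNat
    String.mk (s.map fun c => if c = '1' then '#' else ' ')

-- ===== PRECONDITION & SPEC =====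
def Spec_numtomap (n : Int) (size : Int) (out : String) : Prop := out = numtomap_alt n size
instance (n : Int) (size : Int) (out : String) : Decidable (Spec_numtomap n size out) := by unfold Spec_numtomap; infer_instance

-- ===== CLAIM (what is proved, stated in full; the proofs are below) =====
def Claim_equal_numtomap : Prop := ∀ (n : Int) (size : Int), Dom_numtomap n size → Spec_numtomap n size (numtomap n size)

-- ===== LEMMAS AND PROOFS =====

-- lsb-first bit characters of the loop in A
def lsbBits (n : Int) : Nat → List Char
  | 0 => []
  | k + 1 => (if n % 2 = 1 then '#' else ' ') :: lsbBits (n / 2) k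

theorem numtomap_loop (l : List Int) (acc : List Char) (n : Int) :
    (l.foldl
      (fun (st : List Char × Int) _ =>
        ((if PySem.Int.mod st.2 2 = 1 then st.1 ++ ['#'] else st.1 ++ [' ']),
         PySem.Int.floordiv st.2 2)) (acc, n)).1
      = acc ++ lsbBits n l.length := by
  induction l generalizing acc n with
  | nil => simp [lsbBits]
  | cons x xs ih =>
      simp only [List.foldl_cons, List.length_cons, lsbBits]
      rw [PySem.Int.mod_eq_emod_of_pos (by norm_num),
          PySem.Int.floordiv_eq_ediv_of_pos (by norm_num)]
      split <;> rw [ih] <;> simp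

theorem emod_pow_succ_ediv_two (n : Int) (k : Nat) :
    (n % 2 ^ (k + 1)) / 2 = (n / 2) % 2 ^ k := by
  have h1 : n % 2 ^ (k + 1) = n + 2 * (-(2 ^ k * (n / 2 ^ (k + 1)))) := by
    rw [Int.emod_def]; ring
  have h2 : (n / 2) / 2 ^ k = n / 2 ^ (k + 1) := by
    rw [Int.ediv_ediv_of_nonneg (by positivity)]
    norm_num [pow_succ, mul_comm]
  rw [h1, Int.add_mul_ediv_left _ _ (by norm_num), Int.emod_def, h2]
  ring

theorem emod_pow_succ_emod_two (n : Int) (k : Nat) :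
    (n % 2 ^ (k + 1)) % 2 = n % 2 := by
  exact Int.emod_emod_of_dvd n ⟨2 ^ k, by ring⟩

theorem lsbBits_reverse (k : Nat) : ∀ (n : Int),
    (lsbBits n k).reverse = (binFmt (n % 2 ^ k) k).map fun c => if c = '1' then '#' else ' ' := by
  induction k with
  | zero => intro n; simp [lsbBits, binFmt]
  | succ k ih =>
      intro n
      simp only [lsbBits, binFmt, List.reverse_cons, List.map_append,
        emod_pow_succ_ediv_two, emod_pow_succ_emod_two, ih]
      split <;> simp

-- ===== VERDICT (by name: the statement is the Claim_ definition above) =====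
theorem numtomap_spec : Claim_equal_numtomap := by
  intro n size _
  unfold Spec_numtomap numtomap numtomap_alt
  simp only [numtomap_loop, List.nil_append, PySem.List.length_pyRange_one]
  by_cases h : size ≤ 0
  · have h0 : (size - 0).toNat = 0 := by omega
    rw [h0]
    simp [lsbBits, h]
    rfl
  · have hk : (size - 0).toNat = size.toNat := by omega
    rw [hk, lsbBits_reverse]
    simp [h]
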